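-- pv_equiv track=rewrite | github.com/T-Burton-ND/Util | LAMMPS_Stand/batch_automation/data_handle/monitor_runs.py | detect_current_stage_from_text
-- ===== SOURCE A (Python) =====
-- STAGE_CANON_MAP = {
--     "minimization": "minimization",
--     "relaxation":   "relaxation",
--     "nvt thaw":     "nvt_thaw",
--     "thaw":         "nvt_thaw",
--     "equil":        "equilibration",
--     "equilibrat":   "equilibration",
--     "production":   "production",
-- }
--
-- def detect_current_stage_from_text(text: str) -> str:
--     """
--     Look for the *last* occurrence of a line containing 'starting' and a known keyword.
--     Return canonical stage or "".
--     """
--     current = ""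
--     for line in text.splitlines():
--         s = line.strip().lower()
--         if "starting" not in s:
--             continue
--         # find first matching keyword in priority order as written above
--         for key, canon in STAGE_CANON_MAP.items():
--             if key in s:
--                 current = canon
--                 break
--     return current
-- ===== SOURCE B (Python) =====
-- STAGE_CANON_MAP = {
--     "minimization": "minimization",
--     "relaxation":   "relaxation",
--     "nvt thaw":     "nvt_thaw",
--     "thaw":         "nvt_thaw",
--     "equil":        "equilibration",
--     "equilibrat":   "equilibration",
--     "production":   "production",
-- }
--
-- def detect_current_stage_from_text(text: str) -> str:
--     # Backward scan: the first qualifying line from the end is the answer.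
--     for line in reversed(text.splitlines()):
--         s = line.strip().lower()
--         if "starting" not in s:
--             continue
--         for key, canon in STAGE_CANON_MAP.items():
--             if key in s:
--                 return canon
--     return ""
-- ===== Notes on version B (the rewrite author's own statement) =====
-- stated objective: alternative
-- what changed: Scans the lines back-to-front with an early return at the first line that qualifies (contains the marker word and a known stage keyword), instead of a forward pass accumulating the last match.
import Mathlib
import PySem

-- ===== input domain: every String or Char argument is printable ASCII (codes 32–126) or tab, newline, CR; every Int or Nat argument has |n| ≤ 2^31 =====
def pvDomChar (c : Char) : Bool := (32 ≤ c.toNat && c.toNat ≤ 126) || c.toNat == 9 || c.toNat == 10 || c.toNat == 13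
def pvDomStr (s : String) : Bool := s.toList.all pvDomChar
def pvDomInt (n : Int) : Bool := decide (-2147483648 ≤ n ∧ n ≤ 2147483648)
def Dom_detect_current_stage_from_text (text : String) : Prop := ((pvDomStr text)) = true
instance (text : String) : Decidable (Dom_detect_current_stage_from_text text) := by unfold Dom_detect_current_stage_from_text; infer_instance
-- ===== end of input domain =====

-- B scans the lines back-to-front and returns at the first qualifying line; A scans forward keeping the last match.

-- ===== PORT A =====
-- STAGE_CANON_MAP as an association list in insertion order
def stageCanonMap : List (String × String) :=
  [("minimization", "minimization"),
   ("relaxation",   "relaxation"),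
   ("nvt thaw",     "nvt_thaw"),
   ("thaw",         "nvt_thaw"),
   ("equil",        "equilibration"),
   ("equilibrat",   "equilibration"),
   ("production",   "production")]

-- A's inner 'for key, canon in …: if key in s: current = canon; break'
def scanKeysA (s cur : String) : List (String × String) → String
  | [] => cur
  | (key, canon) :: rest =>
      if PySem.Str.isIn key s then canon else scanKeysA s cur rest

def detect_current_stage_from_text (text : String) : String :=
  (PySem.Str.splitlines text).foldl
    (fun current line =>
      let s := PySem.Str.lower (PySem.Str.strip line)
      if ¬ (PySem.Str.isIn "starting" s) then current
      else scanKeysA s current stageCanonMap) ""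

-- ===== PORT B =====
-- B's inner loop: first matching canon, as an Option
def firstKeyB (s : String) : List (String × String) → Option String
  | [] => none
  | (key, canon) :: rest =>
      if PySem.Str.isIn key s then some canon else firstKeyB s rest

-- B's backward scan with early return
def findStageB : List String → String
  | [] => ""
  | line :: rest =>
      let s := PySem.Str.lower (PySem.Str.strip line)
      if PySem.Str.isIn "starting" s then
        match firstKeyB s stageCanonMap with
        | some canon => canon
        | none => findStageB rest
      else findStageB rest

def detect_current_stage_from_text_alt (text : String) : String :=
  findStageB (PySem.Str.splitlines text).reverse

-- ===== PRECONDITION & SPEC =====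
def Spec_detect_current_stage_from_text (text : String) (out : String) : Prop := out = detect_current_stage_from_text_alt text
instance (text : String) (out : String) : Decidable (Spec_detect_current_stage_from_text text out) := by unfold Spec_detect_current_stage_from_text; infer_instance

-- ===== CLAIM (what is proved, stated in full; the proofs are below) =====
def Claim_equal_detect_current_stage_from_text : Prop := ∀ (text : String), Dom_detect_current_stage_from_text text → Spec_detect_current_stage_from_text text (detect_current_stage_from_text text)

-- ===== LEMMAS AND PROOFS =====

-- what one line contributes, as an Option
def lineStep (line : String) : Option String :=
  let s := PySem.Str.lower (PySem.Str.strip line)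
  if PySem.Str.isIn "starting" s then firstKeyB s stageCanonMap else none

lemma scanKeysA_eq (s cur : String) (m : List (String × String)) :
    scanKeysA s cur m = (firstKeyB s m).getD cur := by
  induction m with
  | nil => rfl
  | cons p rest ih =>
      obtain ⟨k, c⟩ := p
      simp [scanKeysA, firstKeyB]
      split_ifs <;> simp [ih]

lemma stepA_eq (cur line : String) :
    (let s := PySem.Str.lower (PySem.Str.strip line)
     if ¬ (PySem.Str.isIn "starting" s) then cur
     else scanKeysA s cur stageCanonMap) = (lineStep line).getD cur := by
  simp only [lineStep, scanKeysA_eq]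
  split_ifs <;> simp_all

lemma findStageB_eq (ls : List String) :
    findStageB ls = ((ls.findSome? lineStep).getD "") := by
  induction ls with
  | nil => rfl
  | cons line rest ih =>
      simp only [findStageB, List.findSome?, lineStep]
      split_ifs with h
      · cases hf : firstKeyB (PySem.Str.lower (PySem.Str.strip line)) stageCanonMap <;>
          simp [ih]
      · simp [ih]

lemma foldl_eq_findSome_rev (ls : List String) (cur : String) :
    ls.foldl (fun current line =>
      let s := PySem.Str.lower (PySem.Str.strip line)
      if ¬ (PySem.Str.isIn "starting" s) then current
      else scanKeysA s current stageCanonMap) cur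
      = (ls.reverse.findSome? lineStep).getD cur := by
  induction ls generalizing cur with
  | nil => rfl
  | cons line rest ih =>
      simp only [List.foldl_cons, List.reverse_cons]
      rw [ih, List.findSome?_append]
      cases h : rest.reverse.findSome? lineStep with
      | some c => simp
      | none =>
          simp only [Option.none_or]
          rw [stepA_eq]
          cases hs : lineStep line <;> simp [List.findSome?, hs]

-- ===== VERDICT (by name: the statement is the Claim_ definition above) =====
theorem detect_current_stage_from_text_spec : Claim_equal_detect_current_stage_from_text := by
  intro text _
  unfold Spec_detect_current_stage_from_text detect_current_stage_from_text detect_current_stage_from_text_alt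
  rw [foldl_eq_findSome_rev, findStageB_eq]
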